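-- pv_equiv track=rewrite | github.com/yangcr12-art/Radar-website | player-web/server/server_core/routes/fitness_data_api.py | _pick_team_column
-- ===== SOURCE A (Python) =====
-- from typing import Any
--
-- def _normalize_header_name(value: Any) -> str:
--     text = str(value or "").strip().lower().replace("_", " ")
--     return " ".join(text.split())
--
-- def _pick_team_column(headers: list[str]) -> tuple[int, str]:
--     exact_candidates = {"team", "club", "squad", "球队", "俱乐部"}
--     for idx, header in enumerate(headers):
--         normalized = _normalize_header_name(header)
--         if normalized in exact_candidates:
--             return idx, header
--
--     keyword_candidates = ("team", "club", "squad", "球队", "俱乐部")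
--     for idx, header in enumerate(headers):
--         normalized = _normalize_header_name(header)
--         if any(keyword in normalized for keyword in keyword_candidates):
--             return idx, header
--
--     return (-1, "")
-- ===== SOURCE B (Python) =====
-- def _normalize_header_name(value):
--     text = str(value or "").strip().lower().replace("_", " ")
--     return " ".join(text.split())
--
-- KEYWORDS = ("team", "club", "squad", "\u7403\u961f", "\u4ff1\u4e50\u90e8")
-- EXACT = frozenset(KEYWORDS)
--
-- def _pick_team_column(headers):
--     fallback = None
--     for idx, header in enumerate(headers):
--         normalized = _normalize_header_name(header)
--         if normalized in EXACT:
--             return idx, header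
--         if fallback is None and any(k in normalized for k in KEYWORDS):
--             fallback = (idx, header)
--     return fallback if fallback is not None else (-1, "")
-- ===== Notes on version B (the rewrite author's own statement) =====
-- stated objective: alternative
-- what changed: Replaces A's two full passes (each normalizing every header) with a single pass that normalizes each header once, returns on the first exact match and records the first substring match as a fallback.
import Mathlib
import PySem

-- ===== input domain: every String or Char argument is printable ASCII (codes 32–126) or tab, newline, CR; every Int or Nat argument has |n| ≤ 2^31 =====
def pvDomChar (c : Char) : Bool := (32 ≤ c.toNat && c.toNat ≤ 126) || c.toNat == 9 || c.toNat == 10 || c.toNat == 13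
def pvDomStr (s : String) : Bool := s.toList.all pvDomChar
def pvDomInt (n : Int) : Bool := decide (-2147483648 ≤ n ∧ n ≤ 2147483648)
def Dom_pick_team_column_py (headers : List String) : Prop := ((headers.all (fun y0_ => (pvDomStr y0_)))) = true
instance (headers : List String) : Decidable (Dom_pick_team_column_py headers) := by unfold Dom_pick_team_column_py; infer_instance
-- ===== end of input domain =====

-- B replaces A's two full passes over the headers by a single pass that normalizes each
-- header once, returning the first exact match immediately and keeping the first
-- substring match as a fallback (one pass instead of two; objective: alternative).


-- ===== PORT A =====
-- _normalize_header_name: str(value or "") is the identity on str arguments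
-- (an empty string falls back to "" which is the same string), so it is omitted.
def pvNorm (s : String) : String :=
  PySem.Str.join " " (PySem.Str.split₀ (PySem.Str.replace (PySem.Str.lower (PySem.Str.strip s)) "_" " "))

def pvCandidates : List String := ["team", "club", "squad", "球队", "俱乐部"]

-- first loop of A: first exact match
def pvLoop1 : List String → Int → Option (Int × String)
  | [], _ => none
  | h :: t, i => if pvNorm h ∈ pvCandidates then some (i, h) else pvLoop1 t (i + 1)

-- second loop of A: first substring match
def pvLoop2 : List String → Int → Option (Int × String)
  | [], _ => none
  | h :: t, i =>
      if pvCandidates.any (fun k => PySem.Str.isIn k (pvNorm h)) then some (i, h)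
      else pvLoop2 t (i + 1)

def pick_team_column_py (headers : List String) : Int × String :=
  match pvLoop1 headers 0 with
  | some r => r
  | none =>
    match pvLoop2 headers 0 with
    | some r => r
    | none => (-1, "")

-- ===== PORT B =====
-- single pass: return first exact match, remember first substring match as fallback
def pvLoopB : List String → Int → Option (Int × String) → Int × String
  | [], _, fb => fb.getD (-1, "")
  | h :: t, i, fb =>
      let n := pvNorm h
      if n ∈ pvCandidates then (i, h)
      else
        pvLoopB t (i + 1)
          (if fb.isNone && pvCandidates.any (fun k => PySem.Str.isIn k n) then some (i, h) else fb)

def pick_team_column_py_alt (headers : List String) : Int × String :=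
  pvLoopB headers 0 none

-- ===== PRECONDITION & SPEC =====
def Spec_pick_team_column_py (headers : List String) (out : Int × String) : Prop := out = pick_team_column_py_alt headers
instance (headers : List String) (out : Int × String) : Decidable (Spec_pick_team_column_py headers out) := by unfold Spec_pick_team_column_py; infer_instance

-- ===== CLAIM (what is proved, stated in full; the proofs are below) =====
def Claim_equal_pick_team_column_py : Prop := ∀ (headers : List String), Dom_pick_team_column_py headers → Spec_pick_team_column_py headers (pick_team_column_py headers)

-- ===== LEMMAS AND PROOFS =====

-- B's fallback loop = A's two loops, with the fallback taking precedence over loop2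
lemma pvLoopB_eq (xs : List String) : ∀ (i : Int) (fb : Option (Int × String)),
    pvLoopB xs i fb =
      (pvLoop1 xs i).getD ((fb.getD ((pvLoop2 xs i).getD (-1, "")))) := by
  induction xs with
  | nil => intro i fb; cases fb <;> simp [pvLoopB, pvLoop1, pvLoop2]
  | cons h t ih =>
    intro i fb
    simp only [pvLoopB, pvLoop1, pvLoop2]
    by_cases hex : pvNorm h ∈ pvCandidates
    · simp [hex]
    · simp only [hex, if_false, ih]
      cases fb with
      | some f => simp
      | none =>
        simp only [Option.isNone_none, Bool.true_and, Option.getD_none]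
        split <;> simp

-- ===== VERDICT (by name: the statement is the Claim_ definition above) =====
theorem pick_team_column_py_spec : Claim_equal_pick_team_column_py := by
  intro headers _
  unfold Spec_pick_team_column_py pick_team_column_py pick_team_column_py_alt
  rw [pvLoopB_eq]
  cases h1 : pvLoop1 headers 0 with
  | some r => simp
  | none => cases h2 : pvLoop2 headers 0 <;> simp
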